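-- pv_equiv track=rewrite | github.com/badjokeresult/Goarpmon | arp-table-prep-and-send.py | calc_multiple_macs_on_single_ip
-- ===== SOURCE A (Python) =====
-- def calc_multiple_macs_on_single_ip(arp_table):
--     multiple_macs = dict()
--     for row in arp_table:
--         ip = row[0]
--         multiple_macs[ip] = []
--         for column in arp_table:
--             if column[0] == ip:
--                 multiple_macs[ip].append(column[1])
--     return multiple_macs
-- ===== SOURCE B (Python) =====
-- def calc_multiple_macs_on_single_ip(arp_table):
--     seen = []
--     for row in arp_table:
--         if row[0] not in seen:
--             seen.append(row[0])
--     return {ip: [row[1] for row in arp_table if row[0] == ip] for ip in seen}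
-- ===== Notes on version B (the rewrite author's own statement) =====
-- stated objective: alternative
-- what changed: replaces A's per-row rescan that rebuilds every group from scratch on each occurrence by two staged passes: first dedup the IPs in first-occurrence order, then one filtering comprehension per distinct IP
import Mathlib
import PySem

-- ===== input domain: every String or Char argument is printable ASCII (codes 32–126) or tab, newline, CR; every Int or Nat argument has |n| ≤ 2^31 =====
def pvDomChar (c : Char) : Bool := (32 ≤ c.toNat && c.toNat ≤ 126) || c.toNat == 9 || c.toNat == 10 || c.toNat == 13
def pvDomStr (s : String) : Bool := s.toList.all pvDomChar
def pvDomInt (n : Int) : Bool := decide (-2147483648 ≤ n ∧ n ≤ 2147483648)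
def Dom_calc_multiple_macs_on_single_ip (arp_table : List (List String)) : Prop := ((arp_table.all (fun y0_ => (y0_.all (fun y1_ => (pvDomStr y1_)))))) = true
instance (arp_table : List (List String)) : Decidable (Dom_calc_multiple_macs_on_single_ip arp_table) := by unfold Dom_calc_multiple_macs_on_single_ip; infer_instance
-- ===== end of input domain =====

-- B replaces A's per-row rescan (which rebuilds every group from scratch on each occurrence) by two
-- staged passes: dedup the IPs in first-occurrence order, then one filtering comprehension per
-- distinct IP; equivalence is about the return value (A mutates nothing observable).

-- shared row accessors: row[0] / row[1] (Pre_ guarantees the indices are in range)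
def pvKey (r : List String) : String := (PySem.List.pyGet? r 0).getD ""
def pvMac (r : List String) : String := (PySem.List.pyGet? r 1).getD ""

-- ===== PORT A =====
def calc_multiple_macs_on_single_ip (arp_table : List (List String)) : List (String × List String) :=
  (arp_table.foldl (fun d row =>
      arp_table.foldl (fun d column =>
          if pvKey column == pvKey row then
            PySem.Dict.modify d (pvKey row) [] (fun l => l ++ [pvMac column])
          else d)
        (d.insert (pvKey row) []))
    PySem.Dict.empty).items

-- ===== PORT B =====
-- the list comprehension [row[1] for row in t if row[0] == ip]
def pvMacsOf (ip : String) (t : List (List String)) : List String :=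
  t.filterMap (fun row => if pvKey row = ip then some (pvMac row) else none)

def calc_multiple_macs_on_single_ip_alt (arp_table : List (List String)) : List (String × List String) :=
  -- seen: 'append row[0] if not yet in seen' is exactly the PySem.Set fold
  let seen : PySem.Set String := arp_table.foldl (fun s row => PySem.Set.add s (pvKey row)) PySem.Set.empty
  seen.map (fun ip => (ip, pvMacsOf ip arp_table))

-- ===== PRECONDITION & SPEC =====
-- Pre_ excludes exactly the inputs where the Python raises IndexError: a row shorter than 2 entries.
def Pre_calc_multiple_macs_on_single_ip (arp_table : List (List String)) : Prop :=
  ∀ r ∈ arp_table, 2 ≤ r.length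
instance (arp_table : List (List String)) : Decidable (Pre_calc_multiple_macs_on_single_ip arp_table) := by unfold Pre_calc_multiple_macs_on_single_ip; infer_instance
def pvWitness_calc_multiple_macs_on_single_ip : List (List String) :=
  [["1.1.1.1", "aa:aa"], ["2.2.2.2", "bb:bb"], ["1.1.1.1", "cc:cc"]]

def Spec_calc_multiple_macs_on_single_ip (arp_table : List (List String)) (out : List (String × List String)) : Prop := out = calc_multiple_macs_on_single_ip_alt arp_table
instance (arp_table : List (List String)) (out : List (String × List String)) : Decidable (Spec_calc_multiple_macs_on_single_ip arp_table out) := by unfold Spec_calc_multiple_macs_on_single_ip; infer_instance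

-- ===== CLAIM =====
def Claim_equal_calc_multiple_macs_on_single_ip : Prop := ∀ (arp_table : List (List String)), Dom_calc_multiple_macs_on_single_ip arp_table → Pre_calc_multiple_macs_on_single_ip arp_table → Spec_calc_multiple_macs_on_single_ip arp_table (calc_multiple_macs_on_single_ip arp_table)

-- ===== LEMMAS AND PROOFS =====

-- canonical value of A's grouping dict over a prefix p: keys of p in first-occurrence order,
-- MACs drawn from the full table t
def pvModel (p t : List (List String)) : List (String × List String) :=
  (PySem.Set.ofList (p.map pvKey)).map (fun k => (k, pvMacsOf k t))

-- dict primitives on an explicitly decomposed items list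
theorem pv_getD_mid (l₁ l₂ : List (String × List String)) (k : String) (v : List String)
    (h₁ : ∀ q ∈ l₁, q.1 ≠ k) :
    (PySem.Dict.mk (l₁ ++ (k, v) :: l₂)).getD k [] = v := by
  have hf : l₁.find? (fun p => p.1 == k) = none := by
    rw [List.find?_eq_none]; intro q hq; simpa using h₁ q hq
  simp [PySem.Dict.getD, PySem.Dict.get?, List.find?_append, hf]

theorem pv_contains_mid (l₁ l₂ : List (String × List String)) (k : String) (v : List String) :
    (PySem.Dict.mk (l₁ ++ (k, v) :: l₂)).contains k = true := by
  simp [PySem.Dict.contains]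

theorem pv_map_id_of_ne {l : List (String × List String)} {k : String} {w : List String}
    (h : ∀ q ∈ l, q.1 ≠ k) :
    l.map (fun p => if p.1 == k then (k, w) else p) = l := by
  refine (List.map_congr_left ?_).trans (List.map_id _)
  intro q hq
  simp [h q hq]

theorem pv_nodup_cons_not_mem {s₂ : List String} {k : String}
    (h : (k :: s₂).Nodup) : k ∉ s₂ := (List.nodup_cons.mp h).1

theorem pv_insert_mid (l₁ l₂ : List (String × List String)) (k : String) (v w : List String)
    (h₁ : ∀ q ∈ l₁, q.1 ≠ k) (h₂ : ∀ q ∈ l₂, q.1 ≠ k) :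
    (PySem.Dict.mk (l₁ ++ (k, v) :: l₂)).insert k w = PySem.Dict.mk (l₁ ++ (k, w) :: l₂) := by
  rw [PySem.Dict.insert, if_pos (pv_contains_mid l₁ l₂ k v)]
  simp only [List.map_append, List.map_cons, pv_map_id_of_ne h₁, pv_map_id_of_ne h₂]
  simp

theorem pv_insert_notmem (l : List (String × List String)) (k : String) (w : List String)
    (h : ∀ q ∈ l, q.1 ≠ k) :
    (PySem.Dict.mk l).insert k w = PySem.Dict.mk (l ++ [(k, w)]) := by
  have hc : (PySem.Dict.mk l).contains k = false := by
    simp only [PySem.Dict.contains, List.any_eq_false]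
    intro q hq; simpa using h q hq
  simp [PySem.Dict.insert, hc]

theorem pv_modify_mid (l₁ l₂ : List (String × List String)) (k : String) (v : List String)
    (f : List String → List String)
    (h₁ : ∀ q ∈ l₁, q.1 ≠ k) (h₂ : ∀ q ∈ l₂, q.1 ≠ k) :
    (PySem.Dict.mk (l₁ ++ (k, v) :: l₂)).modify k [] f = PySem.Dict.mk (l₁ ++ (k, f v) :: l₂) := by
  rw [PySem.Dict.modify, pv_getD_mid l₁ l₂ k v h₁, pv_insert_mid l₁ l₂ k v (f v) h₁ h₂]

-- A's inner loop, run on a dict holding key k with value v: appends pvMacsOf k L to v, untouched elsewhere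
theorem pv_innerA (k : String) (L : List (List String)) :
    ∀ (l₁ l₂ : List (String × List String)) (v : List String),
      (∀ q ∈ l₁, q.1 ≠ k) → (∀ q ∈ l₂, q.1 ≠ k) →
      L.foldl (fun d column =>
          if pvKey column == k then
            PySem.Dict.modify d k [] (fun l => l ++ [pvMac column])
          else d)
        (PySem.Dict.mk (l₁ ++ (k, v) :: l₂))
      = PySem.Dict.mk (l₁ ++ (k, v ++ pvMacsOf k L) :: l₂) := by
  induction L with
  | nil => intro l₁ l₂ v h₁ h₂; simp [pvMacsOf]
  | cons c L ih =>
    intro l₁ l₂ v h₁ h₂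
    by_cases hc : pvKey c = k
    · simp only [List.foldl_cons, hc, beq_self_eq_true, if_true,
        pv_modify_mid l₁ l₂ k v _ h₁ h₂]
      rw [ih l₁ l₂ (v ++ [pvMac c]) h₁ h₂]
      simp [pvMacsOf, hc]
    · have hb : (pvKey c == k) = false := by simpa using hc
      simp only [List.foldl_cons, hb, Bool.false_eq_true, if_false]
      rw [ih l₁ l₂ v h₁ h₂]
      simp [pvMacsOf, hc]

-- split the nodup key set at a member
theorem pv_split_keys {k : String} {s : List String} (hnd : s.Nodup) (hk : k ∈ s) :
    ∃ s₁ s₂, s = s₁ ++ k :: s₂ ∧ k ∉ s₁ ∧ k ∉ s₂ := by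
  obtain ⟨s₁, s₂, rfl⟩ := List.append_of_mem hk
  refine ⟨s₁, s₂, rfl, ?_, ?_⟩
  · intro h1
    exact (List.disjoint_of_nodup_append hnd) h1 (List.mem_cons_self ..)
  · exact pv_nodup_cons_not_mem (List.nodup_append.mp hnd).2.1

theorem pv_model_decomp {k : String} {p : List (List String)} (t : List (List String))
    (hk : k ∈ p.map pvKey) :
    ∃ m₁ m₂, pvModel p t = m₁ ++ (k, pvMacsOf k t) :: m₂ ∧
      (∀ q ∈ m₁, q.1 ≠ k) ∧ (∀ q ∈ m₂, q.1 ≠ k) := by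
  have hmem : k ∈ PySem.Set.ofList (p.map pvKey) := (PySem.Set.mem_ofList _ _).mpr hk
  obtain ⟨s₁, s₂, hs, h₁, h₂⟩ :=
    pv_split_keys (PySem.Set.nodup_ofList (p.map pvKey)) hmem
  refine ⟨s₁.map (fun k' => (k', pvMacsOf k' t)), s₂.map (fun k' => (k', pvMacsOf k' t)), ?_, ?_, ?_⟩
  · simp [pvModel, hs]
  · intro q hq
    obtain ⟨k', hk', rfl⟩ := List.mem_map.mp hq
    exact fun he => h₁ (by rw [← he]; exact hk')
  · intro q hq
    obtain ⟨k', hk', rfl⟩ := List.mem_map.mp hq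
    exact fun he => h₂ (by rw [← he]; exact hk')

theorem pv_model_keys_ne {k : String} {p t : List (List String)} (hk : k ∉ p.map pvKey) :
    ∀ q ∈ pvModel p t, q.1 ≠ k := by
  intro q hq
  obtain ⟨k', hk', rfl⟩ := List.mem_map.mp hq
  exact fun he => hk ((PySem.Set.mem_ofList _ _).mp (by rw [← he]; exact hk'))

-- A's outer loop over prefix p: the model with MACs drawn from the full table t
theorem pv_A_inv (t : List (List String)) (p : List (List String)) :
    p.foldl (fun d row =>
        t.foldl (fun d column =>
            if pvKey column == pvKey row then
              PySem.Dict.modify d (pvKey row) [] (fun l => l ++ [pvMac column])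
            else d)
          (d.insert (pvKey row) []))
      PySem.Dict.empty
    = PySem.Dict.mk (pvModel p t) := by
  induction p using List.reverseRecOn with
  | nil => simp [pvModel, PySem.Dict.empty, PySem.Set.ofList]
  | append_singleton q r ih =>
    rw [List.foldl_append, ih, List.foldl_cons, List.foldl_nil]
    by_cases hk : pvKey r ∈ q.map pvKey
    · obtain ⟨m₁, m₂, hm, h₁, h₂⟩ := pv_model_decomp t hk
      rw [hm, pv_insert_mid m₁ m₂ _ _ [] h₁ h₂, pv_innerA _ t m₁ m₂ [] h₁ h₂]
      have : pvModel (q ++ [r]) t = pvModel q t := by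
        simp only [pvModel, List.map_append, List.map_cons, List.map_nil,
          PySem.Set.ofList_append_singleton,
          PySem.Set.add_of_mem ((PySem.Set.mem_ofList _ _).mpr hk)]
      rw [this, hm]; simp
    · have hne := pv_model_keys_ne (t := t) hk
      rw [pv_insert_notmem _ _ [] hne]
      rw [pv_innerA (pvKey r) t (pvModel q t) [] [] hne (by simp)]
      have : pvModel (q ++ [r]) t = pvModel q t ++ [(pvKey r, pvMacsOf (pvKey r) t)] := by
        simp only [pvModel, List.map_append, List.map_cons, List.map_nil,
          PySem.Set.ofList_append_singleton,
          PySem.Set.add_of_not_mem (fun h => hk ((PySem.Set.mem_ofList _ _).mp h))]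
      simp [this]

-- B is the model of the full table by unfolding: seen = Set.ofList (map pvKey t)
theorem pv_B_eq_model (t : List (List String)) :
    calc_multiple_macs_on_single_ip_alt t = pvModel t t := by
  simp only [calc_multiple_macs_on_single_ip_alt, pvModel, PySem.Set.ofList_eq_foldl,
    List.foldl_map, PySem.Set.empty]

-- ===== VERDICT =====
theorem calc_multiple_macs_on_single_ip_spec : Claim_equal_calc_multiple_macs_on_single_ip := by
  intro arp_table _ _
  show _ = _
  rw [calc_multiple_macs_on_single_ip, pv_A_inv arp_table arp_table, pv_B_eq_model]
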